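-- pv_equiv track=rewrite | github.com/Neo01010/Machine_learning | 第7章：朴素贝叶斯算法/bayes_abnormal_operate.py | get_user_cmd_feature_new
-- ===== SOURCE A (Python) =====
-- def get_user_cmd_feature_new(user_cmd_list, dist):
--     user_cmd_feature = []
--     for cmd_list in user_cmd_list:
--         v = [0]*len(dist)
--         for i in range(len(dist)):
--             if dist[i] in cmd_list:
--                 v[i] += 1
--         user_cmd_feature.append(v)
--     return user_cmd_feature
-- ===== SOURCE B (Python) =====
-- def get_user_cmd_feature_new(user_cmd_list, dist):
--     # inverted index: value -> list of positions in dist (duplicates kept)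
--     index = {}
--     for i, d in enumerate(dist):
--         index.setdefault(d, []).append(i)
--     n = len(dist)
--     user_cmd_feature = []
--     for cmd_list in user_cmd_list:
--         v = [0] * n
--         for cmd in cmd_list:
--             for i in index.get(cmd, []):
--                 v[i] = 1
--         user_cmd_feature.append(v)
--     return user_cmd_feature
-- ===== Notes on version B (the rewrite author's own statement) =====
-- stated objective: faster
-- what changed: Replaces the per-row scan of dist with an 'in cmd_list' membership test by a precomputed inverted index (value -> positions) built once from dist, then iterating over each cmd_list and setting the indexed positions to 1.
import Mathlib
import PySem

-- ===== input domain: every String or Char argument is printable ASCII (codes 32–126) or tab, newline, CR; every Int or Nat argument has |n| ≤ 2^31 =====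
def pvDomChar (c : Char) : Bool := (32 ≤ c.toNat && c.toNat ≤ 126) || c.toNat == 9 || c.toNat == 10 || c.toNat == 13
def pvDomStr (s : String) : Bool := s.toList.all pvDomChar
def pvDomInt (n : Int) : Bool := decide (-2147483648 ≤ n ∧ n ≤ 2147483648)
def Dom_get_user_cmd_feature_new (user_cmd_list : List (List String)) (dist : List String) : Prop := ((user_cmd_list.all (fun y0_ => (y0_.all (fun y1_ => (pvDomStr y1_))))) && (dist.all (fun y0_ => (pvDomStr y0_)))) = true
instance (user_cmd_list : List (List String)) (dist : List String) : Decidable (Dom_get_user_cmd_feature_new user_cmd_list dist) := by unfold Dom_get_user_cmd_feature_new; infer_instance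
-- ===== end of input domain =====

-- B replaces A's per-row scan of dist (membership test per dist entry) by an inverted index
-- value -> positions built once from dist; objective: faster.

-- ===== PORT A =====
def get_user_cmd_feature_new (user_cmd_list : List (List String)) (dist : List String) : List (List Int) :=
  user_cmd_list.foldl (fun user_cmd_feature cmd_list =>
    user_cmd_feature ++ [
      (PySem.List.pyRange 0 (dist.length : Int) 1).foldl (fun v i =>
        if PySem.List.pyGetD dist i "" ∈ cmd_list then
          PySem.List.pySetD v i (PySem.List.pyGetD v i 0 + 1)
        else v)
        (List.replicate dist.length 0)]) []

-- ===== PORT B =====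
-- index.setdefault(d, []).append(i)  ==  index[d] = index.get(d, []) + [i]
def pvIndexB (dist : List String) : PySem.Dict String (List Int) :=
  (PySem.List.enumerate dist 0).foldl
    (fun idx p => idx.modify p.2 [] (· ++ [p.1])) PySem.Dict.empty

def get_user_cmd_feature_new_alt (user_cmd_list : List (List String)) (dist : List String) : List (List Int) :=
  let index := pvIndexB dist
  user_cmd_list.foldl (fun out cmd_list =>
    out ++ [cmd_list.foldl (fun v cmd =>
      (index.getD cmd []).foldl (fun v i => PySem.List.pySetD v i 1) v)
      (List.replicate dist.length 0)]) []

-- ===== PRECONDITION & SPEC =====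
def Spec_get_user_cmd_feature_new (user_cmd_list : List (List String)) (dist : List String) (out : List (List Int)) : Prop := out = get_user_cmd_feature_new_alt user_cmd_list dist
instance (user_cmd_list : List (List String)) (dist : List String) (out : List (List Int)) : Decidable (Spec_get_user_cmd_feature_new user_cmd_list dist out) := by unfold Spec_get_user_cmd_feature_new; infer_instance

-- ===== CLAIM (what is proved, stated in full; the proofs are below) =====
def Claim_equal_get_user_cmd_feature_new : Prop := ∀ (user_cmd_list : List (List String)) (dist : List String), Dom_get_user_cmd_feature_new user_cmd_list dist → Spec_get_user_cmd_feature_new user_cmd_list dist (get_user_cmd_feature_new user_cmd_list dist)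

-- ===== LEMMAS AND PROOFS =====

-- the common value of both inner loops: the one-hot presence row
def pvRowSpec (cmds : List String) (dist : List String) : List Int :=
  dist.map (fun d => if d ∈ cmds then (1 : Int) else 0)

-- ---- A's inner loop ----
lemma pvTakeSet (v : List Int) (a : Nat) (x : Int) (h : a < v.length) :
    (v.set a x).take (a+1) = v.take a ++ [x] := by
  rw [List.take_add_one, List.getElem?_set_self (by simpa using h), List.take_set,
    List.set_eq_of_length_le (by rw [List.length_take]; omega)]
  rfl

lemma pvRowA_inv (cmds dist : List String) (a : Nat) (v : List Int)
    (hv : v.length = dist.length) (hz : ∀ j, a ≤ j → v.getD j 0 = 0) :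
    (PySem.List.pyRange (a : Int) (dist.length : Int) 1).foldl (fun v i =>
        if PySem.List.pyGetD dist i "" ∈ cmds then
          PySem.List.pySetD v i (PySem.List.pyGetD v i 0 + 1)
        else v) v =
    v.take a ++ (List.range (dist.length - a)).map
      (fun k => if dist.getD (a + k) "" ∈ cmds then (1 : Int) else 0) := by
  induction hn : dist.length - a generalizing a v with
  | zero =>
    rw [PySem.List.pyRange_one_eq_nil (by exact_mod_cast (by omega : dist.length ≤ a))]
    simp only [List.foldl_nil, hn, List.range_zero, List.map_nil, List.append_nil]
    exact (List.take_of_length_le (by omega)).symm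
  | succ n ih =>
    have ha : a < dist.length := by omega
    rw [PySem.List.pyRange_one_cons (by exact_mod_cast ha), List.foldl_cons]
    have hga : PySem.List.pyGetD dist (a : Int) "" = dist.getD a "" := by
      simp [PySem.List.pyGetD_natCast]
    have hva : PySem.List.pyGetD v (a : Int) 0 = 0 := by
      simp only [PySem.List.pyGetD_natCast]; exact hz a le_rfl
    have hcast : (a : Int) + 1 = ((a + 1 : Nat) : Int) := by push_cast; ring
    have hrhs : (List.range (n + 1)).map
        (fun k => if dist.getD (a + k) "" ∈ cmds then (1 : Int) else 0) =
        (if dist.getD a "" ∈ cmds then (1 : Int) else 0) ::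
        (List.range n).map
          (fun k => if dist.getD ((a+1) + k) "" ∈ cmds then (1 : Int) else 0) := by
      rw [List.range_succ_eq_map, List.map_cons, List.map_map]
      refine congrArg₂ _ (by simp) (List.map_congr_left (fun k _ => ?_))
      simp only [Function.comp_apply]
      rw [show a + Nat.succ k = a + 1 + k from by omega]
    rw [hrhs]
    by_cases hmem : dist.getD a "" ∈ cmds
    · rw [hga, if_pos hmem, hva, PySem.List.pySetD_of_nonneg v _ (by positivity), hcast,
        Int.toNat_natCast,
        ih (a + 1) _ (by simpa using hv)
          (fun j hj => by
            have hne : ¬ a = j := by omega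
            simp only [List.getD_eq_getElem?_getD, List.getElem?_set, hne, if_false]
            simpa [List.getD_eq_getElem?_getD] using hz j (by omega))
          (by omega)]
      rw [pvTakeSet v a _ (by omega)]
      have hmem' : dist[a]?.getD "" ∈ cmds := by
        simpa [List.getD_eq_getElem?_getD] using hmem
      simp [hmem']
    · rw [hga, if_neg hmem, hcast,
        ih (a + 1) v hv (fun j hj => hz j (by omega)) (by omega)]
      have h0 : v[a]? = some (0:Int) := by
        have h1 := hz a le_rfl
        rw [List.getD_eq_getElem?_getD] at h1
        rcases h2 : v[a]? with _|x
        · rw [List.getElem?_eq_none_iff] at h2; omega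
        · rw [h2] at h1; simpa using h1
      rw [List.take_add_one, h0]
      have hmem' : dist[a]?.getD "" ∉ cmds := by
        simpa [List.getD_eq_getElem?_getD] using hmem
      simp [hmem']

lemma pvRowA_eq (cmds dist : List String) :
    (PySem.List.pyRange 0 (dist.length : Int) 1).foldl (fun v i =>
        if PySem.List.pyGetD dist i "" ∈ cmds then
          PySem.List.pySetD v i (PySem.List.pyGetD v i 0 + 1)
        else v) (List.replicate dist.length 0) = pvRowSpec cmds dist := by
  have h := pvRowA_inv cmds dist 0 (List.replicate dist.length 0) (by simp)
    (fun j _ => by simp [List.getD_eq_getElem?_getD, List.getElem?_replicate]; split <;> rfl)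
  rw [show ((0:Nat):Int) = (0:Int) from rfl] at h
  rw [h]
  apply List.ext_getElem?
  intro j
  unfold pvRowSpec
  by_cases hj : j < dist.length
  · simp [List.getElem?_map, List.getElem?_range, hj, List.getElem?_eq_getElem hj,
      List.getD_eq_getElem?_getD]
  · simp [List.getElem?_map, List.getElem?_range, hj, List.getElem?_eq_none_iff,
      Nat.le_of_not_lt hj]

-- ---- B's inverted index ----
lemma pvIndexB_getD (dist : List String) (c : String) :
    (pvIndexB dist).getD c [] =
      (((PySem.List.enumerate dist 0).map Prod.swap).filter (fun p => p.1 == c)).map (·.2) := by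
  have h : pvIndexB dist = ((PySem.List.enumerate dist 0).map Prod.swap).foldl
      (fun d q => d.modify q.1 [] (· ++ [q.2])) PySem.Dict.empty := by
    rw [List.foldl_map]; rfl
  rw [h, PySem.Dict.getD_foldl_modify_append]
  simp

lemma pvMem_pos (dist : List String) (c : String) (j : Int) :
    j ∈ (pvIndexB dist).getD c [] ↔ ∃ k : Nat, j = (k : Int) ∧ dist[k]? = some c := by
  rw [pvIndexB_getD]
  simp only [List.mem_map, List.mem_filter, PySem.List.mem_enumerate_iff]
  constructor
  · rintro ⟨q, ⟨⟨p, ⟨k, hk, rfl⟩, rfl⟩, hc⟩, rfl⟩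
    refine ⟨k, by simp, ?_⟩
    rw [List.getElem?_eq_some_iff]
    exact ⟨hk, by simpa using hc⟩
  · rintro ⟨k, rfl, hk⟩
    obtain ⟨hlt, hval⟩ := List.getElem?_eq_some_iff.mp hk
    refine ⟨(c, (k : Int)), ⟨⟨((0 : Int) + k, c), ⟨k, hlt, by simp [hval]⟩, by simp [Prod.swap]⟩, by simp⟩, rfl⟩

-- ---- B's inner loops ----
lemma pvSetFold_len (ps : List Int) (v : List Int) :
    (ps.foldl (fun v i => PySem.List.pySetD v i (1 : Int)) v).length = v.length := by
  induction ps generalizing v with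
  | nil => rfl
  | cons i ps ih => simp [List.foldl_cons, ih, PySem.List.length_pySetD]

lemma pvSetFold_getElem? (ps : List Int) (v : List Int)
    (hps : ∀ i ∈ ps, 0 ≤ i) (j : Nat) :
    (ps.foldl (fun v i => PySem.List.pySetD v i (1 : Int)) v)[j]? =
      if (j : Int) ∈ ps ∧ j < v.length then some 1 else v[j]? := by
  induction ps generalizing v with
  | nil => simp
  | cons i ps ih =>
    have hi : 0 ≤ i := hps i (by simp)
    rw [List.foldl_cons, ih _ (fun x hx => hps x (by simp [hx])),
        PySem.List.pySetD_of_nonneg v (1:Int) hi]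
    by_cases hlen : j < v.length
    · simp only [List.length_set, hlen, and_true, List.getElem?_set, List.mem_cons]
      by_cases hmem : (j : Int) ∈ ps
      · simp [hmem]
      · by_cases hj : (j : Int) = i
        · simp [hj, hlen, show i.toNat = j by omega]
        · simp [hmem, hj, show ¬ i.toNat = j by omega]
    · simp only [List.length_set, hlen, and_false, if_false]
      rw [List.getElem?_eq_none (by simpa using Nat.le_of_not_lt hlen),
        List.getElem?_eq_none (Nat.le_of_not_lt hlen)]

lemma pvRowB_getElem? (cmds dist : List String) (v : List Int)
    (hv : v.length = dist.length) (j : Nat) :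
    (cmds.foldl (fun v cmd =>
      ((pvIndexB dist).getD cmd []).foldl (fun v i => PySem.List.pySetD v i (1 : Int)) v) v)[j]? =
      if ∃ c ∈ cmds, dist[j]? = some c then some 1 else v[j]? := by
  induction cmds generalizing v with
  | nil => simp
  | cons c cmds ih =>
    have hpos : ∀ i ∈ (pvIndexB dist).getD c [], 0 ≤ i := by
      intro i hi
      obtain ⟨k, rfl, -⟩ := (pvMem_pos dist c i).mp hi
      positivity
    have hw : ((((pvIndexB dist).getD c []).foldl (fun v i => PySem.List.pySetD v i (1 : Int)) v)).length = dist.length := by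
      rw [pvSetFold_len, hv]
    rw [List.foldl_cons, ih _ hw, pvSetFold_getElem? _ _ hpos]
    have hmem : ((j : Int) ∈ (pvIndexB dist).getD c []) ↔ dist[j]? = some c := by
      rw [pvMem_pos]
      constructor
      · rintro ⟨k, hk, h⟩; rwa [show k = j by omega] at h
      · intro h; exact ⟨j, rfl, h⟩
    by_cases h1 : ∃ c' ∈ cmds, dist[j]? = some c'
    · simp [h1]
    · by_cases h2 : dist[j]? = some c
      · have hjl : j < v.length := by
          rw [hv]; exact List.getElem?_eq_some_iff.mp h2 |>.1
        simp [h2, hmem, hjl]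
      · have h3 : ¬ ∃ c' ∈ c :: cmds, dist[j]? = some c' := by
          rintro ⟨c', hc', h⟩
          rcases List.mem_cons.mp hc' with rfl | hc'
          · exact h2 h
          · exact h1 ⟨c', hc', h⟩
        simp [h1, h3, hmem, h2]

lemma pvRowB_eq (cmds dist : List String) :
    (cmds.foldl (fun v cmd =>
      ((pvIndexB dist).getD cmd []).foldl (fun v i => PySem.List.pySetD v i (1 : Int)) v)
      (List.replicate dist.length 0)) = pvRowSpec cmds dist := by
  apply List.ext_getElem?
  intro j
  rw [pvRowB_getElem? _ _ _ (by simp) j]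
  unfold pvRowSpec
  rcases h : dist[j]? with _ | d
  · have hj : ¬ j < dist.length := by simpa [List.getElem?_eq_none_iff] using h
    simp [List.getElem?_eq_none_iff, hj]
  · have hj : j < dist.length := (List.getElem?_eq_some_iff.mp h).1
    by_cases hd : d ∈ cmds
    · simp [List.getElem?_map, h, hd]
    · have hdj : dist[j] = d := (List.getElem?_eq_some_iff.mp h).2
      simp [List.getElem?_map, h, hd, hj, hdj]

-- ===== VERDICT (by name: the statement is the Claim_ definition above) =====
theorem get_user_cmd_feature_new_spec : Claim_equal_get_user_cmd_feature_new := by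
  intro u dist _
  unfold Spec_get_user_cmd_feature_new get_user_cmd_feature_new get_user_cmd_feature_new_alt
  rw [PySem.List.foldl_append_singleton_eq_map, PySem.List.foldl_append_singleton_eq_map]
  simp only [List.nil_append]
  refine List.map_congr_left (fun cmds _ => ?_)
  rw [pvRowA_eq, pvRowB_eq]
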